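-- pv_equiv track=rewrite | github.com/sueszli/vector-database-benchmark | dataset/python-mutated/base_ui.py | _analyze_tab_complete_input
-- ===== SOURCE A (Python) =====
-- def _analyze_tab_complete_input(text):
--     if False:
--         while True:
--             i = 10
--     'Analyze raw input to tab-completer.\n\n    Args:\n      text: (str) the full, raw input text to be tab-completed.\n\n    Returns:\n      context: (str) the context str. For example,\n        If text == "print_tensor softmax", returns "print_tensor".\n        If text == "print", returns "".\n        If text == "", returns "".\n      prefix: (str) the prefix to be tab-completed, from the last word.\n        For example, if text == "print_tensor softmax", returns "softmax".\n        If text == "print", returns "print".\n        If text == "", returns "".\n      except_last_word: (str) the input text, except the last word.\n        For example, if text == "print_tensor softmax", returns "print_tensor".\n        If text == "print_tensor -a softmax", returns "print_tensor -a".\n        If text == "print", returns "".\n        If text == "", returns "".\n    '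
--     text = text.lstrip()
--     if not text:
--         context = ''
--         prefix = ''
--         except_last_word = ''
--     else:
--         items = text.split(' ')
--         if len(items) == 1:
--             context = ''
--             prefix = items[0]
--             except_last_word = ''
--         else:
--             context = items[0]
--             prefix = items[-1]
--             except_last_word = ' '.join(items[:-1]) + ' '
--     return (context, prefix, except_last_word)
-- ===== SOURCE B (Python) =====
-- def _analyze_tab_complete_input(text):
--     text = text.lstrip()
--     last = text.rfind(' ')
--     if last == -1:
--         return ('', text, '')
--     first = text.find(' ')
--     return (text[:first], text[last + 1:], text[:last + 1])
-- ===== Notes on version B (the rewrite author's own statement) =====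
-- stated objective: idiomatic
-- what changed: Instead of splitting the text into a token list and re-joining all but the last token with ' '.join, B locates the first-space and last-space positions with str.find/str.rfind and returns three slices of the original text.
import Mathlib
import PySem

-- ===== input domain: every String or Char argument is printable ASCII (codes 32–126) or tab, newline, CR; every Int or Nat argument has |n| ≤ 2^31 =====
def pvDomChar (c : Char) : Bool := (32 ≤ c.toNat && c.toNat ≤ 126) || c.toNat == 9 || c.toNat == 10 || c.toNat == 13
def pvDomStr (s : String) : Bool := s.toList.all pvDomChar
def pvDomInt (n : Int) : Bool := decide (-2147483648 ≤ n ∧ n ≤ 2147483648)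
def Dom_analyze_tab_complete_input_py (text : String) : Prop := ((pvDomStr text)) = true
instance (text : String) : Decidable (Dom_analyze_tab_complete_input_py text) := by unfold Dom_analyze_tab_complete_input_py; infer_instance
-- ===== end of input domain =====

-- B replaces A's token-list split + ' '.join by locating the first/last space with find/rfind and
-- slicing the text; objective: idiomatic (no intermediate list of words is built).

-- ===== PORT A =====
def analyze_tab_complete_input_py (text : String) : String × String × String :=
  let t := PySem.Chars.lstrip text.toList                    -- text = text.lstrip()
  if t = [] then ("", "", "")                                -- if not text
  else
    let items := PySem.Chars.splitOn t [' ']                 -- items = text.split(' ')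
    if items.length = 1 then
      -- items is never empty, so items[0] / items[-1] never raise; the pyGetD default [] is unreachable
      ("", String.ofList (PySem.List.pyGetD items 0 []), "")
    else
      (String.ofList (PySem.List.pyGetD items 0 []),             -- context = items[0]
       String.ofList (PySem.List.pyGetD items (-1) []),          -- prefix = items[-1]
       String.ofList (PySem.Chars.join [' ']
         (PySem.List.slice items none (some (-1))) ++ [' ']))  -- ' '.join(items[:-1]) + ' '

-- ===== PORT B =====
def analyze_tab_complete_input_py_alt (text : String) : String × String × String :=
  let t := PySem.Chars.lstrip text.toList                    -- text = text.lstrip()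
  let last := PySem.Chars.rfind t [' ']                      -- last = text.rfind(' ')
  if last = -1 then ("", String.ofList t, "")
  else
    let first := PySem.Chars.find t [' ']                    -- first = text.find(' ')
    (String.ofList (PySem.List.slice t none (some first)),        -- text[:first]
     String.ofList (PySem.List.slice t (some (last + 1)) none),   -- text[last + 1:]
     String.ofList (PySem.List.slice t none (some (last + 1))))   -- text[:last + 1]

-- ===== PRECONDITION & SPEC =====
def Spec_analyze_tab_complete_input_py (text : String) (out : String × String × String) : Prop := out = analyze_tab_complete_input_py_alt text
instance (text : String) (out : String × String × String) : Decidable (Spec_analyze_tab_complete_input_py text out) := by unfold Spec_analyze_tab_complete_input_py; infer_instance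

-- ===== CLAIM (what is proved, stated in full; the proofs are below) =====
def Claim_equal_analyze_tab_complete_input_py : Prop := ∀ (text : String), Dom_analyze_tab_complete_input_py text → Spec_analyze_tab_complete_input_py text (analyze_tab_complete_input_py text)

-- ===== LEMMAS AND PROOFS =====

-- the maximal space-free prefix of a char list (proof-side notion: the first word)
def pvUpToSpace : List Char → List Char
  | [] => []
  | c :: r => if c = ' ' then [] else c :: pvUpToSpace r

lemma pvUpToSpace_not_mem (l : List Char) : ' ' ∉ pvUpToSpace l := by
  induction l with
  | nil => simp [pvUpToSpace]
  | cons c r ih =>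
    by_cases hc : c = ' '
    · simp [pvUpToSpace, hc]
    · simp only [pvUpToSpace, if_neg hc, List.mem_cons, not_or]
      exact ⟨Ne.symm hc, ih⟩

lemma pvUpToSpace_decomp {l : List Char} (h : ' ' ∈ l) :
    ∃ rest, l = pvUpToSpace l ++ ' ' :: rest := by
  induction l with
  | nil => simp at h
  | cons c r ih =>
    by_cases hc : c = ' '
    · exact ⟨r, by simp [pvUpToSpace, hc]⟩
    · simp only [List.mem_cons, Ne.symm hc, false_or] at h
      obtain ⟨rest, hr⟩ := ih h
      exact ⟨rest, by simp [pvUpToSpace, hc]; exact hr⟩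

-- [' '] is a prefix of l iff l's head is a space
lemma pvSpacePrefix_iff (l : List Char) : [' '] <+: l ↔ l.head? = some ' ' := by
  cases l with
  | nil => simp
  | cons c r =>
    constructor
    · rintro ⟨u, hu⟩
      simp only [List.singleton_append, List.cons.injEq] at hu
      simp [← hu.1]
    · intro h; simp at h; exact ⟨r, by simp [h]⟩

lemma pvSpaceIsPrefixOf_iff (l : List Char) (j : Nat) :
    [' '].isPrefixOf (l.drop j) = true ↔ l[j]? = some ' ' := by
  rw [List.isPrefixOf_iff_prefix, pvSpacePrefix_iff, List.head?_drop]

-- rfind.go returns -1 when no index ≤ n carries a space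
lemma pvRfindGo_none (s : List Char) (n : Nat)
    (h : ∀ j, j ≤ n → s[j]? ≠ some ' ') : PySem.Chars.rfind.go s [' '] n = -1 := by
  induction n with
  | zero =>
    have h0 := h 0 le_rfl
    rw [show PySem.Chars.rfind.go s [' '] 0 = if [' '].isPrefixOf s then 0 else -1 from rfl]
    rw [if_neg]
    intro hp
    exact h0 ((pvSpaceIsPrefixOf_iff s 0).mp (by simpa using hp))
  | succ n ih =>
    rw [show PySem.Chars.rfind.go s [' '] (n+1)
        = if [' '].isPrefixOf (s.drop (n+1)) then ((n+1 : Nat) : Int)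
          else PySem.Chars.rfind.go s [' '] n from rfl]
    rw [if_neg, ih (fun j hj => h j (Nat.le_succ_of_le hj))]
    intro hp
    exact h (n+1) le_rfl ((pvSpaceIsPrefixOf_iff s (n+1)).mp hp)

-- rfind.go returns the highest space index k when one exists below n
lemma pvRfindGo_some (s : List Char) (n k : Nat)
    (hk : s[k]? = some ' ') (hkn : k ≤ n)
    (hmax : ∀ j, k < j → j ≤ n → s[j]? ≠ some ' ') :
    PySem.Chars.rfind.go s [' '] n = (k : Int) := by
  induction n with
  | zero =>
    interval_cases k
    have hp : [' '].isPrefixOf s = true := by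
      have := (pvSpaceIsPrefixOf_iff s 0).mpr hk
      simpa using this
    rw [show PySem.Chars.rfind.go s [' '] 0 = if [' '].isPrefixOf s then 0 else -1 from rfl,
      if_pos hp]
    simp
  | succ n ih =>
    rw [show PySem.Chars.rfind.go s [' '] (n+1)
        = if [' '].isPrefixOf (s.drop (n+1)) then ((n+1 : Nat) : Int)
          else PySem.Chars.rfind.go s [' '] n from rfl]
    by_cases hke : k = n + 1
    · subst hke
      rw [if_pos ((pvSpaceIsPrefixOf_iff s (n+1)).mpr hk)]
    · have hkn' : k ≤ n := by omega
      rw [if_neg, ih hkn' (fun j hj hjn => hmax j hj (Nat.le_succ_of_le hjn))]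
      intro hp
      exact hmax (n+1) (by omega) le_rfl ((pvSpaceIsPrefixOf_iff s (n+1)).mp hp)

-- find of [' '] on p ++ ' ' :: rest with no space in p is p.length
lemma pvFind_decomp {p rest : List Char} (hp : ' ' ∉ p) :
    PySem.Chars.find (p ++ ' ' :: rest) [' '] = (p.length : Int) := by
  set t := p ++ ' ' :: rest with ht
  have hinf : [' '] <:+: t := ⟨p, rest, by simp [ht]⟩
  have hnn : 0 ≤ PySem.Chars.find t [' '] := (PySem.Chars.find_nonneg_iff t [' ']).mpr hinf
  obtain ⟨hpre, hmin⟩ := PySem.Chars.find_spec (s := t) (sub := [' ']) hnn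
  have hat : t[p.length]? = some ' ' := by simp [ht]
  have hle : (PySem.Chars.find t [' ']).toNat ≤ p.length := by
    by_contra hlt
    simp only [not_le] at hlt
    exact hmin _ hlt ((pvSpacePrefix_iff _).mpr (by rw [List.head?_drop]; exact hat))
  have hge : p.length ≤ (PySem.Chars.find t [' ']).toNat := by
    by_contra hlt
    simp only [not_le] at hlt
    have hsp2 : t[(PySem.Chars.find t [' ']).toNat]? = some ' ' := by
      rw [← List.head?_drop]
      exact (pvSpacePrefix_iff _).mp hpre
    rw [ht, List.getElem?_append_left hlt] at hsp2
    exact hp (List.mem_of_getElem? hsp2)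
  omega

-- find of [' '] is the length of the maximal space-free prefix
lemma pvFind_eq {t : List Char} (h : ' ' ∈ t) :
    PySem.Chars.find t [' '] = ((pvUpToSpace t).length : Int) := by
  obtain ⟨rest, hdec⟩ := pvUpToSpace_decomp h
  conv_lhs => rw [hdec]
  rw [pvFind_decomp (pvUpToSpace_not_mem t)]

-- rfind of [' '] on a ++ ' ' :: q with no space in q is a.length
lemma pvRfind_eq {a q : List Char} (hq : ' ' ∉ q) :
    PySem.Chars.rfind (a ++ ' ' :: q) [' '] = (a.length : Int) := by
  rw [PySem.Chars.rfind]
  apply pvRfindGo_some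
  · simp
  · simp
  · intro j hj hjn hcon
    have hj' : a.length + 1 ≤ j := by omega
    rw [List.getElem?_append_right (by omega)] at hcon
    rw [show j - a.length = (j - a.length - 1) + 1 by omega] at hcon
    simp only [List.getElem?_cons_succ] at hcon
    exact hq (List.mem_of_getElem? hcon)

lemma pvRfind_none {t : List Char} (h : ' ' ∉ t) : PySem.Chars.rfind t [' '] = -1 := by
  cases t with
  | nil => decide
  | cons c r =>
    rw [PySem.Chars.rfind]
    apply pvRfindGo_none
    intro j _ hcon
    exact h (List.mem_of_getElem? hcon)

-- pure structural recursion computing text.split(' ') (proved equal to PySem.Chars.splitOn below)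
def pvSp : List Char → List (List Char)
  | [] => [[]]
  | c :: r => if c = ' ' then [] :: pvSp r
              else (c :: (pvSp r).headD []) :: (pvSp r).tail

lemma pvSp_ne_nil (l : List Char) : pvSp l ≠ [] := by
  cases l with
  | nil => simp [pvSp]
  | cons c r => simp only [pvSp]; split <;> simp
lemma pvUpToSpace_append (xs ys : List Char) :
    pvUpToSpace (xs ++ ys) = if ' ' ∈ xs then pvUpToSpace xs else xs ++ pvUpToSpace ys := by
  induction xs with
  | nil => simp
  | cons c r ih =>
    by_cases hc : c = ' '
    · simp [pvUpToSpace, hc]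
    · simp only [List.cons_append, pvUpToSpace, if_neg hc, ih, List.mem_cons,
        Ne.symm hc, false_or]
      split <;> simp
lemma pvSp_of_not_mem {l : List Char} (h : ' ' ∉ l) : pvSp l = [l] := by
  induction l with
  | nil => rfl
  | cons c r ih =>
    simp only [List.mem_cons, not_or] at h
    simp [pvSp, Ne.symm h.1, ih h.2]
lemma pvSp_two_le {l : List Char} (h : ' ' ∈ l) : 2 ≤ (pvSp l).length := by
  induction l with
  | nil => simp at h
  | cons c r ih =>
    by_cases hc : c = ' '
    · subst hc
      have := List.length_pos_iff.mpr (pvSp_ne_nil r)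
      simp [pvSp]; omega
    · simp only [List.mem_cons, Ne.symm hc, false_or] at h
      have h2 := ih h
      obtain ⟨hd, t, hht⟩ := List.exists_cons_of_ne_nil (pvSp_ne_nil r)
      simp only [pvSp, if_neg hc, hht] at *
      simpa using h2
lemma pvSp_headD (l : List Char) : (pvSp l).headD [] = pvUpToSpace l := by
  induction l with
  | nil => rfl
  | cons c r ih =>
    by_cases hc : c = ' '
    · simp [pvSp, pvUpToSpace, hc]
    · obtain ⟨hd, t, hht⟩ := List.exists_cons_of_ne_nil (pvSp_ne_nil r)
      rw [hht] at ih
      simp only [List.headD_cons] at ih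
      simp [pvSp, pvUpToSpace, hc, hht, ih]
lemma pvSp_getLast? (l : List Char) :
    (pvSp l).getLast? = some ((pvUpToSpace l.reverse).reverse) := by
  induction l with
  | nil => rfl
  | cons c r ih =>
    by_cases hr : ' ' ∈ r
    · have hrr : ' ' ∈ r.reverse := by simpa using hr
      by_cases hc : c = ' '
      · subst hc
        obtain ⟨hd, t, hht⟩ := List.exists_cons_of_ne_nil (pvSp_ne_nil r)
        rw [show pvSp (' ' :: r) = [] :: pvSp r by simp [pvSp], hht,
          List.getLast?_cons_cons, ← hht, ih]
        simp [List.reverse_cons, pvUpToSpace_append, hrr]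
      · obtain ⟨hd, t, hht⟩ := List.exists_cons_of_ne_nil (pvSp_ne_nil r)
        have h2 := pvSp_two_le hr
        rw [hht] at h2
        simp only [List.length_cons] at h2
        obtain ⟨q, rest, rfl⟩ : ∃ q rest, t = q :: rest := by
          cases t with
          | nil => simp at h2
          | cons q rest => exact ⟨q, rest, rfl⟩
        rw [show pvSp (c :: r) = (c :: (pvSp r).headD []) :: (pvSp r).tail by simp [pvSp, hc],
          hht]
        simp only [List.headD_cons, List.tail_cons, List.getLast?_cons_cons]
        rw [hht, List.getLast?_cons_cons] at ih
        rw [ih]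
        simp [List.reverse_cons, pvUpToSpace_append, hrr]
    · by_cases hc : c = ' '
      · subst hc
        have hnr : ' ' ∉ r.reverse := by simpa using hr
        rw [show pvSp (' ' :: r) = [] :: pvSp r by simp [pvSp], pvSp_of_not_mem hr]
        simp [List.reverse_cons, pvUpToSpace_append, hnr, pvUpToSpace]
      · have hcr : ' ' ∉ (c :: r).reverse := by simp [hr, Ne.symm hc]
        have hnr : ' ' ∉ r.reverse := by simpa using hr
        rw [show pvSp (c :: r) = (c :: (pvSp r).headD []) :: (pvSp r).tail by simp [pvSp, hc],
          pvSp_of_not_mem hr]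
        simp [pvUpToSpace_append, hnr, pvUpToSpace, hc]
lemma pvSp_join (l : List Char) : PySem.Chars.join [' '] (pvSp l) = l := by
  induction l with
  | nil => simp [pvSp, PySem.Chars.join_singleton]
  | cons c r ih =>
    obtain ⟨hd, t, hht⟩ := List.exists_cons_of_ne_nil (pvSp_ne_nil r)
    by_cases hc : c = ' '
    · subst hc
      rw [show pvSp (' ' :: r) = [] :: pvSp r by simp [pvSp], hht, PySem.Chars.join_cons_cons, ← hht, ih]
      rfl
    · rw [show pvSp (c :: r) = (c :: (pvSp r).headD []) :: (pvSp r).tail by simp [pvSp, hc], hht]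
      simp only [List.headD_cons, List.tail_cons]
      cases t with
      | nil =>
        rw [PySem.Chars.join_singleton]
        rw [hht, PySem.Chars.join_singleton] at ih
        simp [ih]
      | cons q rest =>
        rw [PySem.Chars.join_cons_cons]
        rw [hht, PySem.Chars.join_cons_cons] at ih
        simpa [List.cons_append, List.append_assoc] using congrArg (List.cons c) ih
lemma pvJoin_append_singleton (ds : List (List Char)) (x : List Char) (h : ds ≠ []) :
    PySem.Chars.join [' '] (ds ++ [x]) = PySem.Chars.join [' '] ds ++ ' ' :: x := by
  induction ds with
  | nil => simp at h
  | cons d rest ih =>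
    cases rest with
    | nil => simp [PySem.Chars.join_cons_cons, PySem.Chars.join_singleton]
    | cons e rest' =>
      have ih' := ih (by simp)
      rw [show (e :: rest') ++ [x] = e :: (rest' ++ [x]) from by simp] at ih'
      rw [show (d :: e :: rest') ++ [x] = d :: e :: (rest' ++ [x]) from by simp,
        PySem.Chars.join_cons_cons, ih', PySem.Chars.join_cons_cons]
      simp

lemma pvGo_spec (l : List Char) : ∀ (fuel : Nat) (cur : List Char) (acc : List (List Char)),
    l.length < fuel →
    PySem.Chars.splitOn.go [' '] fuel l cur acc
      = acc.reverse ++ (pvSp l).modifyHead (cur.reverse ++ ·) := by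
  induction l with
  | nil =>
    intro fuel cur acc hf
    match fuel with
    | f + 1 => simp [PySem.Chars.splitOn.go, pvSp]
  | cons c r ih =>
    intro fuel cur acc hf
    match fuel with
    | f + 1 =>
      simp only [List.length_cons, Nat.add_lt_add_iff_right] at hf
      by_cases hc : c = ' '
      · subst hc
        rw [show PySem.Chars.splitOn.go [' '] (f+1) (' ' :: r) cur acc
              = PySem.Chars.splitOn.go [' '] f r [] (cur.reverse :: acc) by
            simp [PySem.Chars.splitOn.go, List.isPrefixOf]]
        rw [ih f [] (cur.reverse :: acc) hf]
        obtain ⟨h, t, hht⟩ := List.exists_cons_of_ne_nil (pvSp_ne_nil r)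
        simp [pvSp, hht]
      · rw [show PySem.Chars.splitOn.go [' '] (f+1) (c :: r) cur acc
              = PySem.Chars.splitOn.go [' '] f r (c :: cur) acc by
            simp [PySem.Chars.splitOn.go, List.isPrefixOf, Ne.symm hc]]
        rw [ih f (c :: cur) acc hf]
        obtain ⟨h, t, hht⟩ := List.exists_cons_of_ne_nil (pvSp_ne_nil r)
        simp [pvSp, hht, if_neg hc]

lemma splitOn_eq_pvSp (l : List Char) : PySem.Chars.splitOn l [' '] = pvSp l := by
  rw [PySem.Chars.splitOn, pvGo_spec l (l.length + 1) [] [] (Nat.lt_succ_self _)]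
  obtain ⟨h, t, hht⟩ := List.exists_cons_of_ne_nil (pvSp_ne_nil l)
  simp [hht]


-- ===== VERDICT (by name: the statement is the Claim_ definition above) =====
theorem analyze_tab_complete_input_py_spec : Claim_equal_analyze_tab_complete_input_py := by
  intro text _dom
  unfold Spec_analyze_tab_complete_input_py
  simp only [analyze_tab_complete_input_py, analyze_tab_complete_input_py_alt]
  generalize PySem.Chars.lstrip text.toList = t
  by_cases hsp : ' ' ∈ t
  · -- at least two words
    have htne : t ≠ [] := by rintro rfl; simp at hsp
    -- the last-word decomposition t = a ++ ' ' :: q, ' ' ∉ q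
    have hqr : ' ' ∉ pvUpToSpace t.reverse := pvUpToSpace_not_mem _
    obtain ⟨rest, hdr⟩ := pvUpToSpace_decomp (l := t.reverse) (by simpa using hsp)
    set q := (pvUpToSpace t.reverse).reverse with hqdef
    have hdec : t = rest.reverse ++ ' ' :: q := by
      have := congrArg List.reverse hdr
      simpa using this
    set a := rest.reverse with hadef
    have hqns : ' ' ∉ q := fun h => hqr (by simpa [hqdef] using h)
    have hrfind : PySem.Chars.rfind t [' '] = (a.length : Int) := by
      rw [hdec]; exact pvRfind_eq hqns
    have hfind : PySem.Chars.find t [' '] = ((pvUpToSpace t).length : Int) := pvFind_eq hsp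
    -- A-side splitOn facts
    have h2 := pvSp_two_le hsp
    have hged : (pvSp t).getLast (pvSp_ne_nil t) = q := by
      have h := pvSp_getLast? t
      rw [List.getLast?_eq_some_getLast (pvSp_ne_nil t)] at h
      exact Option.some.inj h
    obtain ⟨ds, hds⟩ : ∃ ds, pvSp t = ds ++ [q] := by
      refine ⟨(pvSp t).dropLast, ?_⟩
      conv_lhs => rw [← List.dropLast_append_getLast (pvSp_ne_nil t)]
      rw [hged]
    have hdsne : ds ≠ [] := by
      intro h; rw [h] at hds; rw [hds] at h2; simp at h2
    have hjoin : t = PySem.Chars.join [' '] ds ++ ' ' :: q := by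
      conv_lhs => rw [← pvSp_join t, hds]
      rw [pvJoin_append_singleton ds _ hdsne]
    -- a = join ds (both are "t minus ' ' :: q")
    have hads : a = PySem.Chars.join [' '] ds :=
      (List.append_inj' (hdec.symm.trans hjoin) rfl).1
    simp only [splitOn_eq_pvSp, hds, if_neg htne, hrfind]
    have hlen : ¬ (ds ++ [q]).length = 1 := by
      rw [hds] at h2; simp only [List.length_append, List.length_cons, List.length_nil] at h2 ⊢
      omega
    rw [if_neg hlen, if_neg (by omega)]
    refine Prod.ext ?_ (Prod.ext ?_ ?_)
    · -- context = items[0] vs text[:first]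
      have h0 : PySem.List.pyGetD (ds ++ [q]) 0 [] = pvUpToSpace t := by
        rw [← hds, ← pvSp_headD]
        obtain ⟨h, t', hht⟩ := List.exists_cons_of_ne_nil (pvSp_ne_nil t)
        simp [hht, PySem.List.pyGetD, PySem.List.pyGet?, PySem.List.pyIdx?]
      obtain ⟨rest', hdec'⟩ := pvUpToSpace_decomp hsp
      set P := pvUpToSpace t with hP
      have htake : PySem.List.slice t none (some (PySem.Chars.find t [' '])) = P := by
        rw [hfind, PySem.List.slice_to t (Int.natCast_nonneg _), Int.toNat_natCast]
        conv_lhs => rw [hdec']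
        exact List.take_left' rfl
      simp [h0, htake]
    · -- prefix = items[-1] vs text[last+1:]
      have hm1 : PySem.List.pyGetD (ds ++ [q]) (-1) [] = q := by
        simp [PySem.List.pyGetD, PySem.List.pyGet?, PySem.List.pyIdx?]
      have hdrop : PySem.List.slice t (some ((a.length : Int) + 1)) none = q := by
        rw [show ((a.length : Int) + 1) = ((a.length + 1 : Nat) : Int) by push_cast; ring,
          PySem.List.slice_from t (Int.natCast_nonneg _), Int.toNat_natCast]
        conv_lhs => rw [hdec, show a ++ ' ' :: q = (a ++ [' ']) ++ q from by simp]
        exact List.drop_left' (by simp)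
      simp [hm1, hdrop]
    · -- except_last_word: ' '.join(items[:-1]) + ' ' vs text[:last+1]
      have hsl : PySem.List.slice (ds ++ [q]) none (some (-1)) = ds := by
        rw [PySem.List.slice_to_neg_one]
        exact List.dropLast_concat
      have htake : PySem.List.slice t none (some ((a.length : Int) + 1)) = a ++ [' '] := by
        rw [show ((a.length : Int) + 1) = ((a.length + 1 : Nat) : Int) by push_cast; ring,
          PySem.List.slice_to t (Int.natCast_nonneg _), Int.toNat_natCast]
        conv_lhs => rw [hdec, show a ++ ' ' :: q = (a ++ [' ']) ++ q from by simp]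
        exact List.take_left' (by simp)
      simp only [hsl]
      rw [← hads, htake]
  · -- zero or one word: rfind = -1 on both the empty and the single-word text
    have hrf : PySem.Chars.rfind t [' '] = -1 := pvRfind_none hsp
    by_cases hnil : t = []
    · subst hnil
      simp [hrf]
    · have h1 : (pvSp t).length = 1 := by rw [pvSp_of_not_mem hsp]; rfl
      have h0 : PySem.List.pyGetD (pvSp t) 0 [] = t := by
        rw [pvSp_of_not_mem hsp]
        simp [PySem.List.pyGetD, PySem.List.pyGet?, PySem.List.pyIdx?]
      simp [splitOn_eq_pvSp, hrf, hnil, h1, h0]
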